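-- pv_equiv track=rewrite | github.com/ChangxingJiang/OJ-Practice | Question/Offer13/Offer13_Python_1.py | simple_range
-- ===== SOURCE A (Python) =====
-- def simple_range(m, n, k):
--     """一个单独的区域的计算（即一个10*10的范围中的计算）"""
--     ans = 0
--     m, n = min(m, 10), min(n, 10)
--     for i in range(m):
--         for j in range(n):
--             if sum([int(ch) for ch in str(i)]) + sum([int(ch) for ch in str(j)]) <= k:
--                 ans += 1
--     return ans
-- ===== SOURCE B (Python) =====
-- def simple_range(m, n, k):
--     """一个单独的区域的计算（即一个10*10的范围中的计算）"""
--     # In the 10x10 region every coordinate is a single digit, so its digit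
--     # sum is itself; the row count is a clamped closed form, no inner loop.
--     ans = 0
--     n2 = min(n, 10)
--     for i in range(min(m, 10)):
--         ans += max(0, min(n2, k - i + 1))
--     return ans
-- ===== Notes on version B (the rewrite author's own statement) =====
-- stated objective: simpler
-- what changed: The inner loop and the per-number digit-sum computations are replaced by a closed-form clamped count max(0, min(min(n,10), k-i+1)) per row, valid because coordinates below 10 equal their own digit sum.
import Mathlib
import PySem

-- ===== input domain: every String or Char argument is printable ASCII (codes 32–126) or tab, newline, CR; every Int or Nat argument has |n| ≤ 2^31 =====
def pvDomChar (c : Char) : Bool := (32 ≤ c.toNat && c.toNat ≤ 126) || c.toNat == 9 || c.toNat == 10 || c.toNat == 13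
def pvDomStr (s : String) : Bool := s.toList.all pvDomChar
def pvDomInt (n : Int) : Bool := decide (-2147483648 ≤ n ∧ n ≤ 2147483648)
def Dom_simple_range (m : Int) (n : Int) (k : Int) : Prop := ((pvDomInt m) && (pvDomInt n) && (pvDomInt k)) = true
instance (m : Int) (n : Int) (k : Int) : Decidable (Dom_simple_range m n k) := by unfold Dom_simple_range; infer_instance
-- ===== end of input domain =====

-- B replaces the inner loop and digit-sum strings by a closed-form clamped row count (simpler).


-- ===== PORT A =====
-- int(ch): exact here, since every ch that occurs is a decimal digit (0 ≤ i < 10)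
def pvDigit (ch : Char) : Int := (PySem.Int.ofStr? (String.ofList [ch])).getD 0
-- sum([int(ch) for ch in str(i)])
def pvDigitSum (i : Int) : Int := ((PySem.Int.toStr i).toList.map pvDigit).sum

def simple_range (m : Int) (n : Int) (k : Int) : Int :=
  let ans : Int := 0
  let m' := min m 10
  let n' := min n 10
  (PySem.List.pyRange 0 m' 1).foldl (fun ans i =>
    (PySem.List.pyRange 0 n' 1).foldl (fun ans j =>
      if pvDigitSum i + pvDigitSum j ≤ k then ans + 1 else ans) ans) ans

-- ===== PORT B =====
def simple_range_alt (m : Int) (n : Int) (k : Int) : Int :=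
  let n2 := min n 10
  (PySem.List.pyRange 0 (min m 10) 1).foldl (fun ans i => ans + max 0 (min n2 (k - i + 1))) 0

-- ===== PRECONDITION & SPEC =====
def Spec_simple_range (m : Int) (n : Int) (k : Int) (out : Int) : Prop := out = simple_range_alt m n k
instance (m : Int) (n : Int) (k : Int) (out : Int) : Decidable (Spec_simple_range m n k out) := by unfold Spec_simple_range; infer_instance

-- ===== CLAIM (what is proved, stated in full; the proofs are below) =====
def Claim_equal_simple_range : Prop := ∀ (m : Int) (n : Int) (k : Int), Dom_simple_range m n k → Spec_simple_range m n k (simple_range m n k)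

-- ===== LEMMAS AND PROOFS =====

-- a single-digit number is its own digit sum
theorem pvDigitSum_single (i : Int) (h0 : 0 ≤ i) (h1 : i < 10) : pvDigitSum i = i := by
  interval_cases i <;> decide

-- closed-form count of j ∈ [0, s) with i + j ≤ k
theorem count_le_nat (s : Nat) (i k : Int) : ∀ acc : Int,
    (PySem.List.pyRange 0 (s : Int) 1).foldl (fun a j => if i + j ≤ k then a + 1 else a) acc
      = acc + max 0 (min (s : Int) (k - i + 1)) := by
  induction s with
  | zero => intro acc; simp
  | succ s ih =>
    intro acc
    have hcast : ((s + 1 : Nat) : Int) = (s : Int) + 1 := by push_cast; ring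
    rw [hcast, PySem.List.pyRange_one_succ_right (by positivity), List.foldl_append, ih]
    simp only [List.foldl_cons, List.foldl_nil]
    split_ifs with h <;> omega

theorem count_le (t i k : Int) (acc : Int) :
    (PySem.List.pyRange 0 t 1).foldl (fun a j => if i + j ≤ k then a + 1 else a) acc
      = acc + max 0 (min t (k - i + 1)) := by
  by_cases ht : t ≤ 0
  · rw [PySem.List.pyRange_one_eq_nil ht]; simp; omega
  · replace ht : 0 < t := by omega
    have : t = ((t.toNat : Nat) : Int) := by omega
    rw [this, count_le_nat]

theorem inner_eq (t i k : Int) (acc : Int) (ht : t ≤ 10) (hi0 : 0 ≤ i) (hi : i < 10) :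
    (PySem.List.pyRange 0 t 1).foldl (fun a j => if pvDigitSum i + pvDigitSum j ≤ k then a + 1 else a) acc
      = acc + max 0 (min t (k - i + 1)) := by
  have h := PySem.List.foldl_congr_mem
      (l := PySem.List.pyRange 0 t 1)
      (f := fun a j => if pvDigitSum i + pvDigitSum j ≤ k then a + 1 else a)
      (g := fun a j => if i + j ≤ k then a + 1 else a) (init := acc)
      (by
        intro a j hj
        rw [PySem.List.mem_pyRange_one] at hj
        simp only [pvDigitSum_single i hi0 hi, pvDigitSum_single j hj.1 (by omega)])
  exact h.trans (count_le t i k acc)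

-- ===== VERDICT (by name: the statement is the Claim_ definition above) =====
theorem simple_range_spec : Claim_equal_simple_range := by
  intro m n k _
  unfold Spec_simple_range simple_range simple_range_alt
  simp only []
  apply PySem.List.foldl_congr_mem
  intro acc i hi
  rw [PySem.List.mem_pyRange_one] at hi
  exact inner_eq (min n 10) i k acc (by omega) hi.1 (by omega)
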